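-- pv_equiv track=rewrite | github.com/ibtosmlin/atcoder | work/m_solutions2020_f.py | checkUD
-- ===== SOURCE A (Python) =====
-- from collections import defaultdict
-- import bisect
--
-- INF = 10**10
--
-- def checkUD(X):
--     ret = INF
--     AU = defaultdict(list)
--     AD = defaultdict(list)
--     for x, y, u in X:
--         if u == 'U':
--             AU[x].append(y)
--         if u == 'D':
--             AD[x].append(y)
--     for x in AU:
--         if not x in AD: continue
--         ADX = AD[x]
--         ADX.sort()
--         ADX.append(INF)
--         for xi in AU[x]:
--             u = bisect.bisect_left(ADX, xi)
--             if ADX[u] == INF: continue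
--             ret = min(ret, (ADX[u] - xi)*5) # /0.2
--     return ret
-- ===== SOURCE B (Python) =====
-- INF = 10**10
--
-- def checkUD(X):
--     ups = {}
--     downs = {}
--     for x, y, u in X:
--         if u == 'U':
--             ups.setdefault(x, []).append(y)
--         elif u == 'D':
--             downs.setdefault(x, []).append(y)
--     ret = INF
--     for x, us in ups.items():
--         dl = downs.get(x)
--         if dl is None:
--             continue
--         ds = sorted(dl)
--         j = 0
--         n = len(ds)
--         for y in sorted(us):
--             while j < n and ds[j] < y:
--                 j += 1
--             if j < n:
--                 ret = min(ret, (ds[j] - y) * 5)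
--     return ret
-- ===== Notes on version B (the rewrite author's own statement) =====
-- stated objective: alternative
-- what changed: Replaces the per-up-point bisect_left into the INF-sentinel-padded down list by sorting both lists per x and doing a single two-pointer merge sweep with a monotone index, with no sentinel.
import Mathlib
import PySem

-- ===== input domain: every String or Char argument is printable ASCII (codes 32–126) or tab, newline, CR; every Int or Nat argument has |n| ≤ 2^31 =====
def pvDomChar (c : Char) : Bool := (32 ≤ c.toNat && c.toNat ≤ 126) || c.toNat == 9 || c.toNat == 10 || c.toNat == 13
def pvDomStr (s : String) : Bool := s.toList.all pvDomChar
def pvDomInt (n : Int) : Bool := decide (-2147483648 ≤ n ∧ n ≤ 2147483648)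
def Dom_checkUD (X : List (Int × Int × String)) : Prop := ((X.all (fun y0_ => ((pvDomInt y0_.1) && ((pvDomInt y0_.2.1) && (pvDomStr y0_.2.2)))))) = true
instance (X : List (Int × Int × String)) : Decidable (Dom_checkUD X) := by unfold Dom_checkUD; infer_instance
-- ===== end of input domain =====

-- B replaces A's per-up-point bisect_left into an INF-padded down list by a sorted two-pointer
-- merge sweep per x (objective: alternative decomposition of the same search).

def pvINF : Int := 10 ^ 10

-- ===== PORT A =====
-- the single pass building AU and AD: the two independent 'if' statements act on the two
-- components of the (AU, AD) pair
def pvBuildA (X : List (Int × Int × String)) :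
    PySem.Dict Int (List Int) × PySem.Dict Int (List Int) :=
  X.foldl
    (fun s p =>
      (if p.2.2 == "U" then s.1.modify p.1 [] (· ++ [p.2.1]) else s.1,
       if p.2.2 == "D" then s.2.modify p.1 [] (· ++ [p.2.1]) else s.2))
    (PySem.Dict.empty, PySem.Dict.empty)

def checkUD (X : List (Int × Int × String)) : Int :=
  let AUAD := pvBuildA X
  let AU := AUAD.1
  let AD := AUAD.2
  AU.keys.foldl
    (fun ret x =>
      if AD.contains x then
        -- ADX = AD[x]; ADX.sort(); ADX.append(INF)
        let ADX := (PySem.List.sorted (AD.getD x []) (fun v => v) false) ++ [pvINF]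
        (AU.getD x []).foldl
          (fun ret xi =>
            let u := PySem.List.bisectLeft ADX xi
            match PySem.List.pyGet? ADX (u : Int) with
            | none => ret  -- ADX[u] IndexError; unreachable on Dom (xi ≤ 2^31 < INF sentinel)
            | some v => if v == pvINF then ret else min ret ((v - xi) * 5))
          ret
      else ret)
    pvINF

-- ===== PORT B =====
-- ups.setdefault(x, []).append(y) / elif for downs
def pvBuildB (X : List (Int × Int × String)) :
    PySem.Dict Int (List Int) × PySem.Dict Int (List Int) :=
  X.foldl
    (fun s p =>
      if p.2.2 == "U" then (s.1.modify p.1 [] (· ++ [p.2.1]), s.2)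
      else if p.2.2 == "D" then (s.1, s.2.modify p.1 [] (· ++ [p.2.1]))
      else s)
    (PySem.Dict.empty, PySem.Dict.empty)

-- the two-pointer sweep: 'while j < n and ds[j] < y: j += 1' is dropWhile; the advanced
-- suffix is passed to the rest of the up list
def pvSweep (ds : List Int) (us : List Int) (ret : Int) : Int :=
  match us with
  | [] => ret
  | y :: ys =>
    let ds' := ds.dropWhile (fun d => d < y)
    match ds' with
    | [] => pvSweep ds' ys ret
    | d :: _ => pvSweep ds' ys (min ret ((d - y) * 5))

def checkUD_alt (X : List (Int × Int × String)) : Int :=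
  let UD := pvBuildB X
  let ups := UD.1
  let downs := UD.2
  ups.items.foldl
    (fun ret p =>
      match downs.get? p.1 with
      | none => ret
      | some dl =>
        pvSweep (PySem.List.sorted dl (fun v => v) false)
                (PySem.List.sorted p.2 (fun v => v) false) ret)
    pvINF

-- ===== PRECONDITION & SPEC =====
def Spec_checkUD (X : List (Int × Int × String)) (out : Int) : Prop := out = checkUD_alt X
instance (X : List (Int × Int × String)) (out : Int) : Decidable (Spec_checkUD X out) := by unfold Spec_checkUD; infer_instance

-- ===== CLAIM (what is proved, stated in full; the proofs are below) =====
def Claim_equal_checkUD : Prop := ∀ (X : List (Int × Int × String)), Dom_checkUD X → Spec_checkUD X (checkUD X)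

-- ===== LEMMAS AND PROOFS =====

-- the common per-up step: first down ≥ y in s (s the sorted down list), or skip
def pvStep (s : List Int) (ret y : Int) : Int :=
  match s.dropWhile (fun d => d < y) with
  | [] => ret
  | d :: _ => min ret ((d - y) * 5)

theorem pv_bisect_getElem? (l : List Int) (x : Int) (h : l.Pairwise (· ≤ ·)) :
    l[PySem.List.bisectLeft l x]? = (l.dropWhile (fun d => d < x)).head? := by
  obtain ⟨hle, hlt, hge⟩ := PySem.List.bisectLeft_spec l x h
  set k := PySem.List.bisectLeft l x with hk
  set t := l.takeWhile (fun d => decide (d < x)) with ht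
  have htp : t <+: l := ht ▸ List.takeWhile_prefix _
  have htlen : t.length ≤ l.length := htp.length_le
  have hsplit : t ++ l.dropWhile (fun d => decide (d < x)) = l := by
    rw [ht]; exact List.takeWhile_append_dropWhile
  have hkt : k = t.length := by
    rcases lt_trichotomy k t.length with hlt' | he | hgt
    · exfalso
      have hkl : k < l.length := lt_of_lt_of_le hlt' htlen
      have h1 : x ≤ l[k] := hge k hkl le_rfl
      have h2 : t[k]'hlt' = l[k] := htp.getElem hlt'
      have h3 : l[k] ∈ t := h2 ▸ List.getElem_mem hlt'
      have h4 := List.mem_takeWhile_imp (ht ▸ h3)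
      simp at h4
      omega
    · exact he
    · exfalso
      have hne : l.dropWhile (fun d => decide (d < x)) ≠ [] := by
        intro hnil
        have hlen := congrArg List.length hsplit
        rw [hnil] at hlen
        simp at hlen
        omega
      have htl : t.length < l.length := by
        have hlen := congrArg List.length hsplit
        simp at hlen
        have hdlen : (l.dropWhile (fun d => decide (d < x))).length ≠ 0 := by
          intro h0
          exact hne (List.length_eq_zero_iff.mp h0)
        omega
      have h1 : l[t.length] < x := hlt t.length htl hgt
      have h2 : l[t.length]? = (l.dropWhile (fun d => decide (d < x))).head? := by
        conv_lhs => rw [← hsplit]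
        rw [List.getElem?_append_right le_rfl]
        simp [List.head?_eq_getElem?]
      rw [List.getElem?_eq_getElem htl] at h2
      have h3 : (l.dropWhile (fun d => decide (d < x))).head? =
          some ((l.dropWhile (fun d => decide (d < x))).head hne) :=
        List.head?_eq_some_head hne
      rw [h3] at h2
      have h4 := List.head_dropWhile_not (fun d => decide (d < x)) hne
      have h5 : l[t.length] = (l.dropWhile (fun d => decide (d < x))).head hne :=
        Option.some_injective _ h2
      rw [← h5] at h4
      simp at h4
      omega
  rw [hkt]
  conv_lhs => rw [← hsplit]
  rw [List.getElem?_append_right le_rfl]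
  simp [List.head?_eq_getElem?]

-- A's inner step equals pvStep on a sorted, INF-bounded down list with an in-Dom up value
theorem pv_stepA_eq (s : List Int) (ret xi : Int)
    (hs : s.Pairwise (· ≤ ·)) (hb : ∀ d ∈ s, d < pvINF) (hxi : xi ≤ pvINF) :
    (match PySem.List.pyGet? (s ++ [pvINF]) ((PySem.List.bisectLeft (s ++ [pvINF]) xi : Nat) : Int) with
     | none => ret
     | some v => if v == pvINF then ret else min ret ((v - xi) * 5)) = pvStep s ret xi := by
  have hpw : (s ++ [pvINF]).Pairwise (· ≤ ·) := by
    rw [List.pairwise_append]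
    refine ⟨hs, List.pairwise_singleton _ _, ?_⟩
    intro a ha b hb'
    simp at hb'
    subst hb'
    exact le_of_lt (hb a ha)
  have hdw : (s ++ [pvINF]).dropWhile (fun d => d < xi) =
      s.dropWhile (fun d => d < xi) ++ [pvINF] := by
    rw [List.dropWhile_append]
    split
    · rename_i hemp
      rw [List.isEmpty_iff] at hemp
      rw [hemp]
      simp [List.dropWhile, decide_eq_false (not_lt.mpr hxi)]
    · rfl
  rw [PySem.List.pyGet?_natCast, pv_bisect_getElem? _ _ hpw, hdw]
  unfold pvStep
  cases hcase : s.dropWhile (fun d => d < xi) with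
  | nil => simp [pvINF]
  | cons d t =>
    have hd : d ∈ s := List.Sublist.mem (by rw [hcase]; simp) (List.dropWhile_sublist _)
    have hdne : (d == pvINF) = false := by
      simp
      exact ne_of_lt (hb d hd)
    simp [hdne]

-- advancing the pointer first does not change later drops
theorem pv_dropWhile_dropWhile (s : List Int) (y y' : Int) (h : y ≤ y') :
    (s.dropWhile (fun d => d < y)).dropWhile (fun d => d < y') =
      s.dropWhile (fun d => d < y') := by
  induction s with
  | nil => rfl
  | cons a t ih =>
    by_cases ha : a < y
    · have ha' : a < y' := lt_of_lt_of_le ha h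
      simp [ha, ha', ih]
    · simp [List.dropWhile_cons, ha]

theorem pv_sweep_eq_foldl (us : List Int) (s : List Int) (ret : Int)
    (hus : us.Pairwise (· ≤ ·)) :
    pvSweep s us ret = us.foldl (pvStep s) ret := by
  induction us generalizing s ret with
  | nil => rfl
  | cons y ys ih =>
    have hys : ys.Pairwise (· ≤ ·) := hus.tail
    have hyle : ∀ y' ∈ ys, y ≤ y' := fun y' hy' => List.rel_of_pairwise_cons hus hy'
    have hstep : pvSweep s (y :: ys) ret =
        pvSweep (s.dropWhile (fun d => d < y)) ys (pvStep s ret y) := by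
      show (match s.dropWhile (fun d => d < y) with
            | [] => pvSweep (s.dropWhile (fun d => d < y)) ys ret
            | d :: _ => pvSweep (s.dropWhile (fun d => d < y)) ys (min ret ((d - y) * 5))) =
          pvSweep (s.dropWhile (fun d => d < y)) ys (pvStep s ret y)
      unfold pvStep
      cases hc : s.dropWhile (fun d => d < y) <;> simp
    rw [hstep, ih _ _ hys, List.foldl_cons]
    exact PySem.List.foldl_congr_mem ys _ _ _ (by
      intro acc y' hy'
      unfold pvStep
      rw [pv_dropWhile_dropWhile s y y' (hyle y' hy')])

-- pvStep s is right-commutative (needed to reorder A's unsorted up list)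
theorem pv_step_rcomm (s : List Int) : ∀ (r : Int) (a b : Int),
    pvStep s (pvStep s r a) b = pvStep s (pvStep s r b) a := by
  intro r a b
  unfold pvStep
  cases s.dropWhile (fun d => d < a) <;> cases s.dropWhile (fun d => d < b) <;>
    simp [min_comm, min_left_comm]

-- the two build passes produce the same pair of dicts
theorem pv_build_eq (X : List (Int × Int × String)) : pvBuildA X = pvBuildB X := by
  unfold pvBuildA pvBuildB
  refine PySem.List.foldl_congr_mem X _ _ _ ?_
  intro acc p _
  by_cases hU : p.2.2 = "U"
  · simp [hU]
  · by_cases hD : p.2.2 = "D" <;> simp [hU, hD]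

-- the pair fold is two independent folds
theorem pv_build_split (X : List (Int × Int × String)) :
    pvBuildA X =
      (X.foldl (fun d p => if p.2.2 == "U" then d.modify p.1 [] (· ++ [p.2.1]) else d) PySem.Dict.empty,
       X.foldl (fun d p => if p.2.2 == "D" then d.modify p.1 [] (· ++ [p.2.1]) else d) PySem.Dict.empty) := by
  unfold pvBuildA
  exact PySem.List.foldl_prod_mk
    (fun d (p : Int × Int × String) => if p.2.2 == "U" then d.modify p.1 [] (· ++ [p.2.1]) else d)
    (fun d (p : Int × Int × String) => if p.2.2 == "D" then d.modify p.1 [] (· ++ [p.2.1]) else d)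
    X PySem.Dict.empty PySem.Dict.empty

-- the U-component of the build, split into a plain grouping fold over pairs
theorem pv_buildA_fst (X : List (Int × Int × String)) :
    (pvBuildA X).1 = (((X.filter (fun p => p.2.2 == "U")).map (fun p => (p.1, p.2.1))).foldl
      (fun d q => d.modify q.1 [] (· ++ [q.2])) PySem.Dict.empty) := by
  rw [pv_build_split]
  rw [show ((X.foldl (fun d p => if p.2.2 == "U" then d.modify p.1 [] (· ++ [p.2.1]) else d) PySem.Dict.empty,
       X.foldl (fun d p => if p.2.2 == "D" then d.modify p.1 [] (· ++ [p.2.1]) else d) PySem.Dict.empty).1)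
      = X.foldl (fun d p => if p.2.2 == "U" then d.modify p.1 [] (· ++ [p.2.1]) else d) PySem.Dict.empty from rfl]
  rw [PySem.List.foldl_if_eq_foldl_filter, List.foldl_map]

theorem pv_buildA_snd (X : List (Int × Int × String)) :
    (pvBuildA X).2 = (((X.filter (fun p => p.2.2 == "D")).map (fun p => (p.1, p.2.1))).foldl
      (fun d q => d.modify q.1 [] (· ++ [q.2])) PySem.Dict.empty) := by
  rw [pv_build_split]
  rw [show ((X.foldl (fun d p => if p.2.2 == "U" then d.modify p.1 [] (· ++ [p.2.1]) else d) PySem.Dict.empty,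
       X.foldl (fun d p => if p.2.2 == "D" then d.modify p.1 [] (· ++ [p.2.1]) else d) PySem.Dict.empty).2)
      = X.foldl (fun d p => if p.2.2 == "D" then d.modify p.1 [] (· ++ [p.2.1]) else d) PySem.Dict.empty from rfl]
  rw [PySem.List.foldl_if_eq_foldl_filter, List.foldl_map]

-- every value stored in either dict is some y of X
theorem pv_mem_getD_fst (X : List (Int × Int × String)) (x : Int) (v : Int)
    (h : v ∈ (pvBuildA X).1.getD x []) : ∃ p ∈ X, v = p.2.1 := by
  rw [pv_buildA_fst, PySem.Dict.getD_foldl_modify_append] at h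
  simp only [PySem.Dict.getD_empty, List.nil_append, List.mem_map, List.mem_filter] at h
  obtain ⟨q, ⟨⟨p, ⟨hpX, _⟩, rfl⟩, _⟩, hv⟩ := h
  exact ⟨p, hpX, hv.symm⟩

theorem pv_mem_getD_snd (X : List (Int × Int × String)) (x : Int) (v : Int)
    (h : v ∈ (pvBuildA X).2.getD x []) : ∃ p ∈ X, v = p.2.1 := by
  rw [pv_buildA_snd, PySem.Dict.getD_foldl_modify_append] at h
  simp only [PySem.Dict.getD_empty, List.nil_append, List.mem_map, List.mem_filter] at h
  obtain ⟨q, ⟨⟨p, ⟨hpX, _⟩, rfl⟩, _⟩, hv⟩ := h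
  exact ⟨p, hpX, hv.symm⟩

theorem pv_nodup_keys_fst (X : List (Int × Int × String)) : (pvBuildA X).1.keys.Nodup := by
  rw [pv_buildA_fst]
  exact PySem.Dict.nodup_keys_foldl_modify_key _ _ _ _ _ PySem.Dict.nodup_keys_empty

-- ===== VERDICT (by name: the statement is the Claim_ definition above) =====
theorem checkUD_spec : Claim_equal_checkUD := by
  intro X hdom
  unfold Spec_checkUD checkUD checkUD_alt
  rw [← pv_build_eq]
  simp only []
  -- bounds from Dom
  have hbound : ∀ p ∈ X, -2147483648 ≤ p.2.1 ∧ p.2.1 ≤ 2147483648 := by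
    intro p hp
    unfold Dom_checkUD at hdom
    rw [List.all_eq_true] at hdom
    have := hdom p hp
    simp [pvDomInt] at this
    exact this.2.1
  set AU := (pvBuildA X).1 with hAU
  set AD := (pvBuildA X).2 with hAD
  -- keys fold = items fold over first components
  have hkeys : AU.keys = AU.items.map (fun q => q.1) := rfl
  rw [hkeys, List.foldl_map]
  refine PySem.List.foldl_congr_mem AU.items _ _ _ ?_
  intro ret q hq
  obtain ⟨x, us⟩ := q
  have hget : AU.getD x [] = us :=
    PySem.Dict.getD_of_mem_items AU hq (pv_nodup_keys_fst X) []
  rw [PySem.Dict.contains_eq_isSome_get?]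
  cases hd : AD.get? x with
  | none => simp
  | some dl =>
    simp only [Option.isSome_some, if_true, hget]
    have hdl : AD.getD x [] = dl := PySem.Dict.getD_of_get?_eq_some AD [] hd
    rw [hdl]
    set s := PySem.List.sorted dl (fun v => v) false with hs
    have hspw : s.Pairwise (· ≤ ·) := PySem.List.sorted_pairwise dl (fun v => v)
    have hsb : ∀ d ∈ s, d < pvINF := by
      intro d hdm
      rw [hs, PySem.List.mem_sorted] at hdm
      have : d ∈ AD.getD x [] := by rw [hdl]; exact hdm
      obtain ⟨p, hp, hv⟩ := pv_mem_getD_snd X x d this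
      have := hbound p hp
      simp [pvINF]
      omega
    -- A side: replace inner step by pvStep
    have hA : us.foldl
        (fun ret xi =>
          let u := PySem.List.bisectLeft (s ++ [pvINF]) xi
          match PySem.List.pyGet? (s ++ [pvINF]) (u : Int) with
          | none => ret
          | some v => if v == pvINF then ret else min ret ((v - xi) * 5)) ret
        = us.foldl (pvStep s) ret := by
      refine PySem.List.foldl_congr_mem us _ _ _ ?_
      intro acc xi hxi
      have hxim : xi ∈ AU.getD x [] := by rw [hget]; exact hxi
      obtain ⟨p, hp, hv⟩ := pv_mem_getD_fst X x xi hxim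
      have := hbound p hp
      exact pv_stepA_eq s acc xi hspw hsb (by simp [pvINF]; omega)
    rw [hA]
    -- B side: sweep of sorted us = foldl pvStep over sorted us = foldl over us
    rw [pv_sweep_eq_foldl _ s ret (PySem.List.sorted_pairwise us (fun v => v))]
    have : RightCommutative (pvStep s) := ⟨fun r a b => pv_step_rcomm s r a b⟩
    exact (List.Perm.foldl_eq (PySem.List.sorted_perm us (fun v => v) false) ret).symm
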